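-- pv_equiv track=rewrite | github.com/HardyHasan94/GoogleCodeJam | 2021/QualificationRound/reversesort_engineering.py | find_subcosts
-- ===== SOURCE A (Python) =====
-- def find_subcosts(N, C):
--     """
--     Find a sum of N-1 terms that is equal to C,
--     where each term is within its bounds.
--
--     Parameters
--     ----------
--     N: int
--         Length of list
--     C: int
--         Cost of sorting.
--
--     Returns
--     -------
--     subcosts: list
--         List of the terms at each position in the sum.
--     """
--     subcosts = [1 for _ in range(N-1)]
--     upper_bounds = [N-i for i in range(N-1)]
--
--     for pos in range(N-1):
--         if sum(subcosts) == C: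
--             break
--         ub = upper_bounds[pos] - 1
--         while sum(subcosts) != C and ub > 0:
--             subcosts[pos] += 1
--             ub -= 1
--
--     return subcosts
-- ===== SOURCE B (Python) =====
-- def find_subcosts(N, C):
--     """Distribute the extra cost C - (N-1) greedily, left to right, in one pass.
--
--     Each of the N-1 positions starts at its minimum 1 and can absorb up to
--     N - pos - 1 extra on top of that.
--     """
--     subcosts = []
--     extra = C - (N - 1)
--     for pos in range(N - 1):
--         add = min(extra, N - pos - 1)
--         subcosts.append(1 + add)
--         extra -= add
--     return subcosts
-- ===== Notes on version B (the rewrite author's own statement) =====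
-- stated objective: simpler
-- what changed: A re-evaluates sum(subcosts) inside a unit-increment while loop at every position (an O(N) scan repeated up to N times per position); B tracks the remaining extra cost in one variable and appends 1 + min(extra, bound) per position in a single pass. Pre_ excludes infeasible costs C < N-1 (for N >= 2), where no list of bounded terms can sum to C and any returned list is arbitrary (A maxes every term, B lets the first term absorb the deficit).
-- outside the precondition, e.g. on find_subcosts(4, 2): A returns [4, 3, 2], B returns [0, 1, 1]
import Mathlib
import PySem

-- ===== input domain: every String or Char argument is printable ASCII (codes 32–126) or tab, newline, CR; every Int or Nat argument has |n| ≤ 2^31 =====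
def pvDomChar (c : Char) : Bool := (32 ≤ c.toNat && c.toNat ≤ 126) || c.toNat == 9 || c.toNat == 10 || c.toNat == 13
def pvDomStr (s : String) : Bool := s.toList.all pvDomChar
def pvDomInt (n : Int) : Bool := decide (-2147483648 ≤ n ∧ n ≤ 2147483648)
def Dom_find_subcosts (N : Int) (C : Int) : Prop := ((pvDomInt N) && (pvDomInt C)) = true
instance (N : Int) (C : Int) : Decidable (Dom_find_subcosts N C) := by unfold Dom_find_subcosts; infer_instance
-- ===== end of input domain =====

-- B replaces A's repeated-sum greedy loops by one pass that tracks the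
-- remaining extra cost and adds min(extra, bound) per position (faster).

-- ===== PORT A =====
-- the inner 'while sum(subcosts) != C and ub > 0: subcosts[pos] += 1; ub -= 1'
-- (ub, decremented to 0, is the Nat fuel; the guard order matches Python's)
def pvWhileA (C : Int) (pos : Nat) : Nat → List Int → List Int
  | 0, sc => sc
  | u + 1, sc => if sc.sum ≠ C then pvWhileA C pos u (sc.modify pos (· + 1)) else sc

-- the body of A's 'for pos in range(N-1)' loop; the Bool is the break flag
def pvStepA (C : Int) (ubs : List Int) (st : List Int × Bool) (pos : Int) : List Int × Bool :=
  if st.2 then st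
  else if st.1.sum = C then (st.1, true)
  else
    let ub := PySem.List.pyGetD ubs pos 0 - 1
    (pvWhileA C pos.toNat ub.toNat st.1, false)

def find_subcosts (N : Int) (C : Int) : List Int :=
  let subcosts := (PySem.List.pyRange 0 (N - 1) 1).map (fun _ => (1 : Int))
  let upper_bounds := (PySem.List.pyRange 0 (N - 1) 1).map (fun i => N - i)
  ((PySem.List.pyRange 0 (N - 1) 1).foldl (pvStepA C upper_bounds) (subcosts, false)).1

-- ===== PORT B =====
-- the body of B's single pass; state = (subcosts so far, extra)
def pvStepB (N : Int) (st : List Int × Int) (pos : Int) : List Int × Int :=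
  let add := min st.2 (N - pos - 1)
  (st.1 ++ [1 + add], st.2 - add)

def find_subcosts_alt (N : Int) (C : Int) : List Int :=
  ((PySem.List.pyRange 0 (N - 1) 1).foldl (pvStepB N) ([], C - (N - 1))).1

-- ===== PRECONDITION & SPEC =====
-- Pre_ excludes infeasible costs C < N-1 (for N ≥ 2): no list of bounded terms can
-- sum to such a C, so any returned list is arbitrary (A maxes every term, B lets the
-- first term absorb the deficit); it admits every feasible input and all N ≤ 1.
def Pre_find_subcosts (N : Int) (C : Int) : Prop := N ≤ 1 ∨ N - 1 ≤ C
instance (N : Int) (C : Int) : Decidable (Pre_find_subcosts N C) := by unfold Pre_find_subcosts; infer_instance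
def pvWitness_find_subcosts : Int × Int := (4, 8)

def Spec_find_subcosts (N : Int) (C : Int) (out : List Int) : Prop := out = find_subcosts_alt N C
instance (N : Int) (C : Int) (out : List Int) : Decidable (Spec_find_subcosts N C out) := by unfold Spec_find_subcosts; infer_instance

-- ===== CLAIM (what is proved, stated in full; the proofs are below) =====
def Claim_equal_find_subcosts : Prop := ∀ (N : Int) (C : Int), Dom_find_subcosts N C → Pre_find_subcosts N C → Spec_find_subcosts N C (find_subcosts N C)

-- ===== LEMMAS AND PROOFS =====

-- common ghost recursion: values produced from position p with remaining extra r,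
-- fuel = number of positions still to fill (the r < 0 branch characterises A only;
-- B is proved equal to it under 0 ≤ r, which Pre_ guarantees)
def pvG (N : Int) : Nat → Int → Int → List Int
  | 0, _, _ => []
  | m + 1, p, r =>
    let ub := N - p - 1
    let add := if r < 0 then ub else min r ub
    (1 + add) :: pvG N m (p + 1) (r - add)

lemma pvModifyAppend {α : Type} (pre : List α) (x : α) (suf : List α) (f : α → α) :
    (pre ++ x :: suf).modify pre.length f = pre ++ f x :: suf := by
  induction pre with
  | nil => simp [List.modify]
  | cons a t ih => simpa [List.modify_succ_cons] using ih

lemma pvWhileA_append (C : Int) : ∀ (u : Nat) (pre suf : List Int) (x : Int),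
    pvWhileA C pre.length u (pre ++ x :: suf)
      = pre ++ (x + (if 0 ≤ C - (pre ++ x :: suf).sum
                     then min (C - (pre ++ x :: suf).sum) (u : Int) else (u : Int))) :: suf := by
  intro u
  induction u with
  | zero =>
    intro pre suf x
    have h0 : (if 0 ≤ C - (pre ++ x :: suf).sum
        then min (C - (pre ++ x :: suf).sum) ((0 : Nat) : Int) else ((0 : Nat) : Int)) = 0 := by
      split_ifs with h <;> omega
    rw [h0, pvWhileA]
    simp
  | succ u ih =>
    intro pre suf x
    rw [pvWhileA]
    by_cases h : (pre ++ x :: suf).sum = C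
    · rw [if_neg (by simpa using h)]
      have h0 : (if 0 ≤ C - (pre ++ x :: suf).sum
          then min (C - (pre ++ x :: suf).sum) ((u + 1 : Nat) : Int) else ((u + 1 : Nat) : Int)) = 0 := by
        split_ifs with h' <;> push_cast <;> omega
      rw [h0]
      simp
    · rw [if_pos h, pvModifyAppend, ih pre suf (x + 1)]
      have hs : (pre ++ (x + 1) :: suf).sum = (pre ++ x :: suf).sum + 1 := by
        simp [List.sum_append]; ring
      rw [hs]
      congr 2
      have hne : C - (pre ++ x :: suf).sum ≠ 0 := by omega
      split_ifs <;> push_cast <;> omega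

-- B's fold equals pvG when the extra is nonnegative (then it stays nonnegative)
lemma pvB_fold (N : Int) : ∀ (m : Nat) (p r : Int) (acc : List Int), 0 ≤ r → p + m = N - 1 →
    ((PySem.List.pyRange p (N - 1) 1).foldl (pvStepB N) (acc, r)).1 = acc ++ pvG N m p r := by
  intro m
  induction m with
  | zero =>
    intro p r acc hr hp
    rw [PySem.List.pyRange_one_eq_nil (by omega)]
    simp [pvG]
  | succ k ih =>
    intro p r acc hr hp
    rw [PySem.List.pyRange_one_cons (by omega)]
    simp only [List.foldl_cons]
    rw [show pvStepB N (acc, r) p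
          = (acc ++ [1 + min r (N - p - 1)], r - min r (N - p - 1)) from rfl]
    rw [ih (p + 1) _ _ (by omega) (by omega)]
    have hif : (if r < 0 then N - p - 1 else min r (N - p - 1)) = min r (N - p - 1) := by
      rw [if_neg (by omega)]
    simp only [pvG, hif]
    simp

-- A's fold equals pvG
lemma pvG_succ (N : Int) (m : Nat) (p r : Int) :
    pvG N (m + 1) p r
      = (1 + (if r < 0 then N - p - 1 else min r (N - p - 1)))
          :: pvG N m (p + 1) (r - (if r < 0 then N - p - 1 else min r (N - p - 1))) := rfl

lemma pvA_fold (N C : Int) : ∀ (m : Nat) (pre : List Int) (b : Bool),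
    (pre.length : Int) + m = N - 1 →
    (b = true → (pre ++ List.replicate m 1).sum = C) →
    ((PySem.List.pyRange (pre.length) (N - 1) 1).foldl
        (pvStepA C ((PySem.List.pyRange 0 (N - 1) 1).map (fun i => N - i)))
        (pre ++ List.replicate m 1, b)).1
      = pre ++ pvG N m pre.length (C - (pre ++ List.replicate m 1).sum) := by
  intro m
  induction m with
  | zero =>
    intro pre b hp hb
    rw [PySem.List.pyRange_one_eq_nil (a := (pre.length : Int)) (b := N - 1) (by omega)]
    simp [pvG]
  | succ k ih =>
    intro pre b hp hb
    have hub0 : (0 : Int) < N - pre.length - 1 := by omega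
    rw [PySem.List.pyRange_one_cons (a := (pre.length : Int)) (b := N - 1) (by omega)]
    simp only [List.foldl_cons]
    have hsc : pre ++ List.replicate (k + 1) (1 : Int) = pre ++ 1 :: List.replicate k 1 := by
      simp [List.replicate_succ]
    -- continuation helper: apply ih after one element y has been appended
    have hcont : ∀ (y : Int) (b' : Bool),
        (b' = true → ((pre ++ [y]) ++ List.replicate k 1).sum = C) →
        ((PySem.List.pyRange ((pre.length : Int) + 1) (N - 1) 1).foldl
            (pvStepA C ((PySem.List.pyRange 0 (N - 1) 1).map (fun i => N - i)))
            ((pre ++ [y]) ++ List.replicate k 1, b')).1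
          = (pre ++ [y]) ++ pvG N k ((pre.length : Int) + 1)
              (C - ((pre ++ [y]) ++ List.replicate k 1).sum) := by
      intro y b' hb'
      have := ih (pre ++ [y]) b' (by simp; omega) hb'
      simpa using this
    rw [hsc]
    -- the two "no work at this position" cases (already broken / sum hits C) share this tail
    have htail : (pre ++ 1 :: List.replicate k (1 : Int)).sum = C →
        ((PySem.List.pyRange ((pre.length : Int) + 1) (N - 1) 1).foldl
            (pvStepA C ((PySem.List.pyRange 0 (N - 1) 1).map (fun i => N - i)))
            (pre ++ 1 :: List.replicate k 1, true)).1
          = pre ++ pvG N (k + 1) pre.length (C - (pre ++ 1 :: List.replicate k 1).sum) := by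
      intro hsum0
      have h1 : ((pre ++ [1]) ++ List.replicate k (1 : Int)).sum = C := by
        simpa using hsum0
      rw [show pre ++ 1 :: List.replicate k (1 : Int) = (pre ++ [1]) ++ List.replicate k 1 by simp,
          hcont 1 true (fun _ => h1), h1, pvG_succ]
      have hCC : C - C = (0 : Int) := by omega
      rw [hCC]
      have hadd : (if (0 : Int) < 0 then N - (pre.length : Int) - 1
          else min 0 (N - (pre.length : Int) - 1)) = 0 := by
        split_ifs <;> omega
      rw [hadd]
      simp
    cases b with
    | true =>
      have hsum0 : (pre ++ 1 :: List.replicate k (1 : Int)).sum = C := by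
        rw [← hsc]; exact hb rfl
      rw [show pvStepA C ((PySem.List.pyRange 0 (N - 1) 1).map (fun i => N - i))
            (pre ++ 1 :: List.replicate k 1, true) (pre.length : Int)
            = (pre ++ 1 :: List.replicate k 1, true) from rfl]
      exact htail hsum0
    | false =>
      by_cases hC : (pre ++ 1 :: List.replicate k (1 : Int)).sum = C
      · -- sum already equals C: the loop breaks, nothing changes any more
        have hstep : pvStepA C ((PySem.List.pyRange 0 (N - 1) 1).map (fun i => N - i))
              (pre ++ 1 :: List.replicate k 1, false) (pre.length : Int)
            = (pre ++ 1 :: List.replicate k 1, true) := by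
          simp [pvStepA, hC]
        rw [hstep]
        exact htail hC
      · -- the while loop runs: it adds min(remaining, ub) (or fills up) at this position
        have hub : PySem.List.pyGetD ((PySem.List.pyRange 0 (N - 1) 1).map (fun i => N - i))
              (pre.length : Int) 0 = N - pre.length :=
          PySem.List.pyGetD_map_pyRange_of_nonneg _ _ _ _ (by positivity) (by omega)
        have hubnat : (((N - (pre.length : Int) - 1).toNat : Nat) : Int)
            = N - (pre.length : Int) - 1 := by omega
        have hstep : pvStepA C ((PySem.List.pyRange 0 (N - 1) 1).map (fun i => N - i))
              (pre ++ 1 :: List.replicate k 1, false) (pre.length : Int)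
            = (pvWhileA C pre.length (N - (pre.length : Int) - 1).toNat
                (pre ++ 1 :: List.replicate k 1), false) := by
          have hC' : ¬ pre.sum + (1 + (k : Int)) = C := by simpa using hC
          simp [pvStepA, hub, hC']
        rw [hstep, pvWhileA_append C _ pre (List.replicate k 1) 1, hubnat]
        set r := C - (pre ++ 1 :: List.replicate k (1 : Int)).sum with hr
        set a := (if 0 ≤ r then min r (N - (pre.length : Int) - 1)
                  else N - (pre.length : Int) - 1) with ha
        rw [show pre ++ (1 + a) :: List.replicate k (1 : Int)
              = (pre ++ [1 + a]) ++ List.replicate k 1 by simp]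
        rw [hcont (1 + a) false (by simp)]
        have hs : ((pre ++ [1 + a]) ++ List.replicate k (1 : Int)).sum
            = (pre ++ 1 :: List.replicate k (1 : Int)).sum + a := by
          simp [List.sum_append]; ring
        rw [hs, pvG_succ]
        have haw : (if r < 0 then N - (pre.length : Int) - 1
            else min r (N - (pre.length : Int) - 1)) = a := by
          rw [ha]; split_ifs <;> omega
        rw [haw, show C - ((pre ++ 1 :: List.replicate k (1 : Int)).sum + a) = r - a by omega]
        simp

-- ===== VERDICT (by name: the statement is the Claim_ definition above) =====
theorem find_subcosts_spec : Claim_equal_find_subcosts := by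
  intro N C _ hpre
  unfold Spec_find_subcosts find_subcosts find_subcosts_alt
  by_cases hN : 2 ≤ N
  · have hr0 : 0 ≤ C - (N - 1) := by
      rcases hpre with h | h <;> omega
    have hm : (([] : List Int).length : Int) + (N - 1).toNat = N - 1 := by simp; omega
    have hA := pvA_fold N C (N - 1).toNat [] false hm (by simp)
    have hB := pvB_fold N (N - 1).toNat 0 (C - (N - 1)) [] (by omega) (by omega)
    simp only [List.length_nil, Int.natCast_zero, List.nil_append] at hA hB
    have hrep : (PySem.List.pyRange 0 (N - 1) 1).map (fun _ => (1 : Int))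
        = List.replicate (N - 1).toNat 1 := by
      rw [List.map_const']
      simp [PySem.List.length_pyRange_one]
    rw [hrep, hA, hB]
    have hsum : (List.replicate (N - 1).toNat (1 : Int)).sum = ((N - 1).toNat : Int) := by
      simp [List.sum_replicate]
    rw [hsum]
    congr 1
    omega
  · have h0 : PySem.List.pyRange 0 (N - 1) 1 = [] :=
      PySem.List.pyRange_one_eq_nil (by omega)
    simp [h0]
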